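-- pv_equiv track=rewrite | github.com/rogue67/pysource | min_rekursion.py | j_finds
-- ===== SOURCE A (Python) =====
-- def j_finds(s):          ##ÖVN 2
--     if s == '':
--         return False
--     else:
--         if s[0] == 'j':
--             return  True
--         else:
--             return j_finds(s[1:])
-- ===== SOURCE B (Python) =====
-- def j_finds(s):
--     found = False
--     for c in s:
--         found = found or c == 'j'
--     return found
-- ===== Notes on version B (the rewrite author's own statement) =====
-- stated objective: faster
-- what changed: Replaces the suffix recursion (empty-string guard plus recursive call on s[1:], which copies a slice at every step) with a single iterative fold over the characters accumulating a boolean flag.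
import Mathlib
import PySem

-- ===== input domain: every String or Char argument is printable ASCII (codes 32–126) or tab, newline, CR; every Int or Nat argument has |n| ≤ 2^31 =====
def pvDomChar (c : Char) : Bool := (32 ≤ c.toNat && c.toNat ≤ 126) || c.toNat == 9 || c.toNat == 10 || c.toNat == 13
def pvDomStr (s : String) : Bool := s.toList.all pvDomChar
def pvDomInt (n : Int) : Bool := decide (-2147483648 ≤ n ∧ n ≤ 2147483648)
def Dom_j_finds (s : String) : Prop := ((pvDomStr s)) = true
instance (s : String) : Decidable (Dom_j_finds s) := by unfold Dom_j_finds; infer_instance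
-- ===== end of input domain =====

-- B replaces A's suffix recursion by a single iterative fold over the characters (alternative decomposition).


-- ===== PORT A =====
-- A's recursion: empty-string test, head test, recursive call on the tail (s[1:]).
def jFindsRecA : List Char → Bool
  | [] => false
  | c :: rest => if c == 'j' then true else jFindsRecA rest

def j_finds (s : String) : Bool := jFindsRecA s.toList

-- ===== PORT B =====
-- B's loop: fold over the characters accumulating the 'found' flag.
def j_finds_alt (s : String) : Bool :=
  s.toList.foldl (fun found c => found || c == 'j') false

-- ===== PRECONDITION & SPEC =====
def Spec_j_finds (s : String) (out : Bool) : Prop := out = j_finds_alt s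
instance (s : String) (out : Bool) : Decidable (Spec_j_finds s out) := by unfold Spec_j_finds; infer_instance

-- ===== CLAIM (what is proved, stated in full; the proofs are below) =====
def Claim_equal_j_finds : Prop := ∀ (s : String), Dom_j_finds s → Spec_j_finds s (j_finds s)

-- ===== LEMMAS AND PROOFS =====
theorem jFinds_foldl_true (l : List Char) :
    l.foldl (fun found c => found || c == 'j') true = true := by
  induction l with
  | nil => rfl
  | cons c rest ih => simpa using ih

theorem jFindsRecA_eq_foldl (l : List Char) :
    jFindsRecA l = l.foldl (fun found c => found || c == 'j') false := by
  induction l with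
  | nil => rfl
  | cons c rest ih =>
    by_cases h : c = 'j'
    · simp [jFindsRecA, h, jFinds_foldl_true]
    · simp [jFindsRecA, h, ih, show (c == 'j') = false by simp [h]]

-- ===== VERDICT (by name: the statement is the Claim_ definition above) =====
theorem j_finds_spec : Claim_equal_j_finds := by
  intro s _
  unfold Spec_j_finds j_finds j_finds_alt
  exact jFindsRecA_eq_foldl s.toList
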